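-- pv_equiv track=rewrite | github.com/yzgyyang/diffoscope | diffoscope/diff.py | linediff_simplify
-- ===== SOURCE A (Python) =====
-- def linediff_simplify(g):
--     """Simplify the output of WF."""
--     current = None
--     for l, r in g:
--         if not current:
--             current = l, r
--         elif current[0][0] == l[0] and current[1][0] == r[0]:
--             current = (
--                 (l[0], current[0][1] + l[1]),
--                 (r[0], current[1][1] + r[1]),
--             )
--         else:
--             yield current
--             current = l, r
--     if current:
--         yield current
-- ===== SOURCE B (Python) =====
-- def linediff_simplify(g):
--     """Simplify the output of WF: regroup into maximal runs of equal tag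
--     pairs, then concatenate each run's texts in one join per side."""
--     items = list(g)
--     n = len(items)
--     i = 0
--     while i < n:
--         key = (items[i][0][0], items[i][1][0])
--         lparts, rparts = [], []
--         j = i
--         while j < n and (items[j][0][0], items[j][1][0]) == key:
--             lparts.append(items[j][0][1])
--             rparts.append(items[j][1][1])
--             j += 1
--         yield ((key[0], ''.join(lparts)), (key[1], ''.join(rparts)))
--         i = j
-- ===== Notes on version B (the rewrite author's own statement) =====
-- stated objective: idiomatic
-- what changed: B replaces A's single-pass pending-accumulator generator with a regroup-then-fold decomposition: it splits the stream into maximal runs of equal (left-tag, right-tag) pairs and emits one pair per run with each side's texts concatenated by a single join.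
import Mathlib
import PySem

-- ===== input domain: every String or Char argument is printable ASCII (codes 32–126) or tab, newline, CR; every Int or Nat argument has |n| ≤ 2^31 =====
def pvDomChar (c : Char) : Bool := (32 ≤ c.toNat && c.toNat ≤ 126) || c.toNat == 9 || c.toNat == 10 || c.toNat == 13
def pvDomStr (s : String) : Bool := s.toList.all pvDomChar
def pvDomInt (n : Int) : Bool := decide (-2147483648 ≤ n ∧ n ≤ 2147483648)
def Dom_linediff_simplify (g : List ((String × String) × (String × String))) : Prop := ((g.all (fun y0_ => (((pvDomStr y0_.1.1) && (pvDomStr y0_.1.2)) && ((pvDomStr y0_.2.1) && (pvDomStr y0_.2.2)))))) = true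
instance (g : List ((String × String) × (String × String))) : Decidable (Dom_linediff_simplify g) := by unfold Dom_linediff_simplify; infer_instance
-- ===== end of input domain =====

-- B regroups the stream into maximal runs of equal tag pairs and joins each
-- run's texts once per side (idiomatic regroup-then-fold; same O(n) cost).
-- A and B are generators; both ports return the list of yielded values.

-- ===== PORT A =====
-- the loop: 'current' is the pending merged pair (None before the first item)
def pvGoA (rest : List ((String × String) × (String × String)))
    (current : Option ((String × String) × (String × String))) :
    List ((String × String) × (String × String)) :=
  match rest with
  | [] =>
    -- 'if current: yield current' (current, once set, is a 2-tuple, always truthy)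
    match current with
    | none => []
    | some c => [c]
  | (l, r) :: rest =>
    match current with
    | none => pvGoA rest (some (l, r))
    | some c =>
      if c.1.1 = l.1 ∧ c.2.1 = r.1 then
        pvGoA rest (some ((l.1, c.1.2 ++ l.2), (r.1, c.2.2 ++ r.2)))
      else
        c :: pvGoA rest (some (l, r))

def linediff_simplify (g : List ((String × String) × (String × String))) : List ((String × String) × (String × String)) :=
  pvGoA g none

-- ===== PORT B =====
-- inner while loop of Source B: collect the run of items whose tag pair equals key,
-- returning (left texts of the run, right texts of the run, remaining items)
def pvRunB (key : String × String) :
    List ((String × String) × (String × String)) →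
    (List String × List String × List ((String × String) × (String × String)))
  | [] => ([], [], [])
  | x :: rest =>
    if (x.1.1, x.2.1) = key then
      let t := pvRunB key rest
      (x.1.2 :: t.1, x.2.2 :: t.2.1, t.2.2)
    else ([], [], x :: rest)

-- termination measure for the outer loop (cited by decreasing_by below)
theorem pvRunB_rem_le (key : String × String)
    (l : List ((String × String) × (String × String))) :
    (pvRunB key l).2.2.length ≤ l.length := by
  induction l with
  | nil => simp [pvRunB]
  | cons x rest ih =>
    simp only [pvRunB]
    split
    · exact Nat.le_succ_of_le ih
    · exact Nat.le_refl _

-- outer while loop of Source B; the first inner-loop iteration always matches the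
-- key (it defines it), so the head is consumed directly and pvRunB scans the rest
def linediff_simplify_alt (g : List ((String × String) × (String × String))) : List ((String × String) × (String × String)) :=
  match g with
  | [] => []
  | x :: rest =>
    let t := pvRunB (x.1.1, x.2.1) rest
    ((x.1.1, PySem.Str.join "" (x.1.2 :: t.1)),
     (x.2.1, PySem.Str.join "" (x.2.2 :: t.2.1))) :: linediff_simplify_alt t.2.2
  termination_by g.length
  decreasing_by
    exact Nat.lt_succ_of_le (pvRunB_rem_le _ _)

-- ===== PRECONDITION & SPEC =====
def Spec_linediff_simplify (g : List ((String × String) × (String × String))) (out : List ((String × String) × (String × String))) : Prop := out = linediff_simplify_alt g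
instance (g : List ((String × String) × (String × String))) (out : List ((String × String) × (String × String))) : Decidable (Spec_linediff_simplify g out) := by unfold Spec_linediff_simplify; infer_instance

-- ===== CLAIM (what is proved, stated in full; the proofs are below) =====
def Claim_equal_linediff_simplify : Prop := ∀ (g : List ((String × String) × (String × String))), Dom_linediff_simplify g → Spec_linediff_simplify g (linediff_simplify g)

-- ===== LEMMAS AND PROOFS =====

-- ''.join(s :: l) peels its head off as a plain concatenation
theorem pv_join_cons (s : String) (l : List String) :
    PySem.Str.join "" (s :: l) = s ++ PySem.Str.join "" l := by
  apply String.toList_injective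
  cases l <;> simp [PySem.Str.toList_join, PySem.Chars.join, List.intercalate]

-- A's loop with a pending pair ((lt,al),(rt,ar)) emits that pair extended by the
-- texts of the run of key (lt,rt) at the front of rest, then proceeds as B does
theorem pv_join_nil : PySem.Str.join "" ([] : List String) = "" := by
  apply String.toList_injective
  simp [PySem.Str.toList_join, PySem.Chars.join, List.intercalate]

theorem pvGoA_some (rest : List ((String × String) × (String × String))) :
    ∀ (lt rt al ar : String),
      pvGoA rest (some ((lt, al), (rt, ar))) =
        ((lt, al ++ PySem.Str.join "" (pvRunB (lt, rt) rest).1),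
         (rt, ar ++ PySem.Str.join "" (pvRunB (lt, rt) rest).2.1)) ::
          linediff_simplify_alt (pvRunB (lt, rt) rest).2.2 := by
  induction rest with
  | nil =>
    intro lt rt al ar
    simp [pvGoA, pvRunB, linediff_simplify_alt, pv_join_nil]
  | cons x rest ih =>
    intro lt rt al ar
    obtain ⟨⟨l1, l2⟩, ⟨r1, r2⟩⟩ := x
    by_cases h1 : lt = l1
    · by_cases h2 : rt = r1
      · subst h1; subst h2
        simp [pvGoA, pvRunB, ih, pv_join_cons, String.append_assoc]
      · have hB : ¬ ((l1, r1) = (lt, rt)) := by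
          intro h; exact h2 (congrArg Prod.snd h).symm
        simp [pvGoA, pvRunB, h2, hB, ih, linediff_simplify_alt, pv_join_nil, pv_join_cons]
    · have hB : ¬ ((l1, r1) = (lt, rt)) := by
        intro h; exact h1 (congrArg Prod.fst h).symm
      simp [pvGoA, pvRunB, h1, hB, ih, linediff_simplify_alt, pv_join_nil, pv_join_cons]

-- ===== VERDICT (by name: the statement is the Claim_ definition above) =====
theorem linediff_simplify_spec : Claim_equal_linediff_simplify := by
  intro g _
  unfold Spec_linediff_simplify linediff_simplify
  cases g with
  | nil => simp [pvGoA, linediff_simplify_alt]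
  | cons x rest =>
    obtain ⟨⟨l1, l2⟩, ⟨r1, r2⟩⟩ := x
    simp only [pvGoA]
    rw [pvGoA_some]
    simp [linediff_simplify_alt, pv_join_cons]
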